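/- GENERATED by c/gen_decode.py: decode facts of the image, one per distinct instruction byte string. -/
import UserX.DecodeImage

#decode_all Vorbis.Dec
  "01e8"  -- add eax,ebp
  "0f838ffdffff"  -- jae 1094b8
  "0f84cd000000"  -- je 10f29c
  "0f86a4000000"  -- jbe 1024f2
  "0f8e9c000000"  -- jle 107828
  "0fb64c242c"  -- movzx ecx,BYTE PTR [rsp+0x2c]
  "29fa"  -- sub edx,edi
  "4101c5"  -- add r13d,eax
  "41395c2404"  -- cmp DWORD PTR [r12+0x4],ebx
  "4183ef1f"  -- sub r15d,0x1f
  "4189f5"  -- mov r13d,esi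
  "41bf00000000"  -- mov r15d,0x0
  "4288442311"  -- mov BYTE PTR [rbx+r12*1+0x11],al
  "44396320"  -- cmp DWORD PTR [rbx+0x20],r12d
  "44896304"  -- mov DWORD PTR [rbx+0x4],r12d
  "4489c3"  -- mov ebx,r8d
  "448b75e8"  -- mov r14d,DWORD PTR [rbp-0x18]
  "450fb6e4"  -- movzx r12d,r12b
  "4589e7"  -- mov r15d,r12d
  "4688a43cc0000000"  -- mov BYTE PTR [rsp+r15*1+0xc0],r12b
  "486344240c"  -- movsxd rax,DWORD PTR [rsp+0xc]
  "4881c498050000"  -- add rsp,0x598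
  "4883f91f"  -- cmp rcx,0x1f
  "4889b550ffffff"  -- mov QWORD PTR [rbp-0xb0],rsi
  "488b542410"  -- mov rdx,QWORD PTR [rsp+0x10]
  "488bbc24c80b0000"  -- mov rdi,QWORD PTR [rsp+0xbc8]
  "488d742420"  -- lea rsi,[rsp+0x20]
  "488d7de4"  -- lea rdi,[rbp-0x1c]
  "488dbbc8010000"  -- lea rdi,[rbx+0x1c8]
  "488dbde0010000"  -- lea rdi,[rbp+0x1e0]
  "48c7452800000000"  -- mov QWORD PTR [rbp+0x28],0x0
  "4939d5"  -- cmp r13,rdx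
  "4989d4"  -- mov r12,rdx
  "498d7c2419"  -- lea rdi,[r12+0x19]
  "498dbe30080000"  -- lea rdi,[r14+0x830]
  "4a8d7c3321"  -- lea rdi,[rbx+r14*1+0x21]
  "4c03a3c8010000"  -- add r12,QWORD PTR [rbx+0x1c8]
  "4c89ada8000000"  -- mov QWORD PTR [rbp+0xa8],r13
  "4c8b7c2410"  -- mov r15,QWORD PTR [rsp+0x10]
  "4c8dad30080000"  -- lea r13,[rbp+0x830]
  "4d89fc"  -- mov r12,r15
  "660f28c1"  -- movapd xmm0,xmm1
  "66410f6ed5"  -- movd xmm2,r13d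
  "66480f6ee3"  -- movq xmm4,rbx
  "7416"  -- je 10c57b
  "74e7"  -- je 100221
  "771a"  -- ja 104840
  "7df3"  -- jge 103230
  "7fa2"  -- jg 114507
  "837c241807"  -- cmp DWORD PTR [rsp+0x18],0x7
  "84db"  -- test bl,bl
  "896b58"  -- mov DWORD PTR [rbx+0x58],ebp
  "89de"  -- mov esi,ebx
  "8b542408"  -- mov edx,DWORD PTR [rsp+0x8]
  "8b85e8060000"  -- mov eax,DWORD PTR [rbp+0x6e8]
  "b800000001"  -- mov eax,0x1000000
  "c1e508"  -- shl ebp,0x8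
  "c7805001c000f3f3f3f3"  -- mov DWORD PTR [rax+0xc00150],0xf3f3f3f3
  "d3e0"  -- shl eax,cl
  "e808a0feff"  -- call 100640
  "e812a7feff"  -- call 100640
  "e81c32ffff"  -- call 100800
  "e826a4ffff"  -- call 100640
  "e82ef1feff"  -- call 100560
  "e8393effff"  -- call 100720
  "e844b5feff"  -- call 100640
  "e84e90ffff"  -- call 100800
  "e859effeff"  -- call 100300
  "e86890ffff"  -- call 100800
  "e8731dffff"  -- call 100640
  "e87da5feff"  -- call 100300
  "e88949ffff"  -- call 100720
  "e892f6feff"  -- call 100640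
  "e89cedfeff"  -- call 100640
  "e8a771ffff"  -- call 102e60
  "e8b168ffff"  -- call 100640
  "e8bb6affff"  -- call 100480
  "e8c5a7feff"  -- call 100720
  "e8cf7dffff"  -- call 10d1c0
  "e8d9a1feff"  -- call 100640
  "e8e33bffff"  -- call 1003c0
  "e8ec23ffff"  -- call 100300
  "e8f5faffff"  -- call 10e5c0
  "e903feffff"  -- jmp 111a3e
  "e946ffffff"  -- jmp 10768b
  "e998020000"  -- jmp 106c47
  "e9eadfffff"  -- jmp 113b22
  "eb60"  -- jmp 10c922
  "ebda"  -- jmp 104504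
  "f20f58059bd70100"  -- addsd xmm0,QWORD PTR [rip+0x1d79b]
  "f20f5e150ce00100"  -- divsd xmm2,QWORD PTR [rip+0x1e00c]
  "f30f104d00"  -- movss xmm1,DWORD PTR [rbp+0x0]
  "f30f1073f0"  -- movss xmm6,DWORD PTR [rbx-0x10]
  "f30f114dec"  -- movss DWORD PTR [rbp-0x14],xmm1
  "f30f1174240c"  -- movss DWORD PTR [rsp+0xc],xmm6
  "f30f58c8"  -- addss xmm1,xmm0
  "f30f59d8"  -- mulss xmm3,xmm0
  "f3410f1007"  -- movss xmm0,DWORD PTR [r15]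
  "f3410f584500"  -- addss xmm0,DWORD PTR [r13+0x0]
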